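-- pv_equiv track=rewrite | github.com/bretbouchard/blender_gsd | lib/retro/tiles.py | resize_tile_map
-- ===== SOURCE A (Python) =====
-- from typing import Dict, Any, Optional, Tuple, List, TYPE_CHECKING
--
-- def resize_tile_map(
--     tile_map: List[List[int]],
--     new_size: Tuple[int, int],
--     fill_value: int = 0
-- ) -> List[List[int]]:
--     """
--     Resize tile map to new dimensions.
--
--     Args:
--         tile_map: Original tile map
--         new_size: (width, height) in tiles
--         fill_value: Value for new tiles
--
--     Returns:
--         Resized tile map
--     """
--     new_width, new_height = new_size
--
--     result = []
--
--     for y in range(new_height):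
--         row = []
--         for x in range(new_width):
--             if y < len(tile_map) and x < len(tile_map[0]):
--                 row.append(tile_map[y][x])
--             else:
--                 row.append(fill_value)
--         result.append(row)
--
--     return result
-- ===== SOURCE B (Python) =====
-- def resize_tile_map(tile_map, new_size, fill_value=0):
--     new_width, new_height = new_size
--     width, height = max(new_width, 0), max(new_height, 0)
--     copy_w = min(width, len(tile_map[0])) if tile_map else 0
--     result = [row[:copy_w] + [fill_value] * (width - copy_w)
--               for row in tile_map[:height]]
--     result += [[fill_value] * width for _ in range(height - len(result))]
--     return result
-- ===== Notes on version B (the rewrite author's own statement) =====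
-- stated objective: simpler
-- what changed: B builds each output row branch-free as a slice of the source row concatenated with a replicated fill tail, then appends whole fill rows, instead of A's per-cell if-test inside two nested loops.
import Mathlib
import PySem

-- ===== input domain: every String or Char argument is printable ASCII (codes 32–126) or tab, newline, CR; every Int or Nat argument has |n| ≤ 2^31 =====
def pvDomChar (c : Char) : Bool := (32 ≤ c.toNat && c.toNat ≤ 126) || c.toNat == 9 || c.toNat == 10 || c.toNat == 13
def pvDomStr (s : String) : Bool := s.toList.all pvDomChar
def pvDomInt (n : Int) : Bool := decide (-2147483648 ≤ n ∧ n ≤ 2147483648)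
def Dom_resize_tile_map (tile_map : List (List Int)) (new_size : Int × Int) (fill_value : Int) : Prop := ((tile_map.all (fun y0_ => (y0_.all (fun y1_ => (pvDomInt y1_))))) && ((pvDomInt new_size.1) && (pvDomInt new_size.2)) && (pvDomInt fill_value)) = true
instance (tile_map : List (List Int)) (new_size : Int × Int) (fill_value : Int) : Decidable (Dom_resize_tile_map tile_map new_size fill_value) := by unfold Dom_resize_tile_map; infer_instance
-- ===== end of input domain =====

-- B replaces A's per-cell branch inside two nested loops by branch-free row construction
-- (slice of the source row ++ replicated fill), then whole fill rows. Objective: simpler.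

-- ===== PORT A =====
def resize_tile_map (tile_map : List (List Int)) (new_size : Int × Int) (fill_value : Int) : List (List Int) :=
  (PySem.List.pyRange 0 new_size.2 1).foldl (fun result y =>
    result ++ [(PySem.List.pyRange 0 new_size.1 1).foldl (fun row x =>
      row ++ [if y < (tile_map.length : Int) ∧ x < (((tile_map.headD []).length : Int)) then
                PySem.List.pyGetD (PySem.List.pyGetD tile_map y []) x 0
              else fill_value]) []]) []

-- ===== PORT B =====
def resize_tile_map_alt (tile_map : List (List Int)) (new_size : Int × Int) (fill_value : Int) : List (List Int) :=
  let width : Int := max new_size.1 0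
  let height : Int := max new_size.2 0
  let copy_w : Int := if tile_map = [] then 0 else min width ((tile_map.headD []).length : Int)
  let result : List (List Int) :=
    (PySem.List.slice tile_map none (some height)).map
      (fun row => PySem.List.slice row none (some copy_w) ++ List.replicate (width - copy_w).toNat fill_value)
  result ++ List.replicate (height - (result.length : Int)).toNat (List.replicate width.toNat fill_value)

-- ===== PRECONDITION & SPEC =====
-- Pre_ excludes exactly the inputs on which A raises IndexError: a ragged row within the
-- first new_height rows that is shorter than min(new_width, len(tile_map[0])).
def Pre_resize_tile_map (tile_map : List (List Int)) (new_size : Int × Int) (fill_value : Int) : Prop :=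
  ∀ row ∈ tile_map.take new_size.2.toNat,
    min new_size.1.toNat (tile_map.headD []).length ≤ row.length
instance (tile_map : List (List Int)) (new_size : Int × Int) (fill_value : Int) : Decidable (Pre_resize_tile_map tile_map new_size fill_value) := by unfold Pre_resize_tile_map; infer_instance

def pvWitness_resize_tile_map : List (List Int) × (Int × Int) × Int := ([[1, 2], [3, 4]], (3, 3), 0)

def Spec_resize_tile_map (tile_map : List (List Int)) (new_size : Int × Int) (fill_value : Int) (out : List (List Int)) : Prop := out = resize_tile_map_alt tile_map new_size fill_value
instance (tile_map : List (List Int)) (new_size : Int × Int) (fill_value : Int) (out : List (List Int)) : Decidable (Spec_resize_tile_map tile_map new_size fill_value out) := by unfold Spec_resize_tile_map; infer_instance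

-- ===== CLAIM (what is proved, stated in full; the proofs are below) =====
def Claim_equal_resize_tile_map : Prop := ∀ (tile_map : List (List Int)) (new_size : Int × Int) (fill_value : Int), Dom_resize_tile_map tile_map new_size fill_value → Pre_resize_tile_map tile_map new_size fill_value → Spec_resize_tile_map tile_map new_size fill_value (resize_tile_map tile_map new_size fill_value)

-- ===== LEMMAS AND PROOFS =====

-- A's double fold written as a nested range-map.
lemma resize_tile_map_eq_map (tm : List (List Int)) (ns : Int × Int) (fv : Int) :
    resize_tile_map tm ns fv =
      (List.range ns.2.toNat).map (fun (y : Nat) =>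
        (List.range ns.1.toNat).map (fun (x : Nat) =>
          if (y : Int) < (tm.length : Int) ∧ (x : Int) < ((tm.headD []).length : Int) then
            (tm.getD y []).getD x 0
          else fv)) := by
  unfold resize_tile_map
  rw [PySem.List.foldl_append_singleton_eq_map, PySem.List.pyRange_one 0 ns.2, List.map_map]
  simp only [Int.sub_zero]
  apply List.map_congr_left
  intro y _
  simp only [Function.comp_apply, zero_add]
  rw [PySem.List.foldl_append_singleton_eq_map, PySem.List.pyRange_one 0 ns.1, List.map_map]
  simp only [Int.sub_zero]
  apply List.map_congr_left
  intro x _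
  simp only [Function.comp_apply, zero_add]
  simp [PySem.List.pyGetD_natCast]

-- B rewritten over Nat-valued bounds.
lemma resize_tile_map_alt_eq (tm : List (List Int)) (ns : Int × Int) (fv : Int) :
    resize_tile_map_alt tm ns fv =
      (tm.take ns.2.toNat).map (fun row =>
        row.take (min ns.1.toNat (tm.headD []).length) ++
          List.replicate (ns.1.toNat - min ns.1.toNat (tm.headD []).length) fv) ++
      List.replicate (ns.2.toNat - min ns.2.toNat tm.length) (List.replicate ns.1.toNat fv) := by
  simp only [resize_tile_map_alt]
  have hcw : (if tm = [] then (0:Int) else min (max ns.1 0) ((tm.headD []).length : Int))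
      = min (max ns.1 0) ((tm.headD []).length : Int) := by
    split_ifs with h
    · subst h; simp
    · rfl
  have hc : (0:Int) ≤ min (max ns.1 0) ((tm.headD []).length : Int) := by positivity
  rw [hcw, PySem.List.slice_to tm (le_max_right _ _)]
  have hbig : (max ns.2 0).toNat = ns.2.toNat := by omega
  rw [hbig]
  congr 1
  · apply List.map_congr_left
    intro row _
    rw [PySem.List.slice_to row hc]
    congr 2 <;> omega
  · simp only [List.length_map, List.length_take]
    congr 1
    · omega
    · congr 1; omega

lemma range_map_const {α : Type} (n : Nat) (c : α) :
    (List.range n).map (fun _ => c) = List.replicate n c := by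
  simp only [List.map_const', List.length_range]

-- ===== VERDICT (by name: the statement is the Claim_ definition above) =====
theorem resize_tile_map_spec : Claim_equal_resize_tile_map := by
  intro tm ns fv _ hpre
  unfold Spec_resize_tile_map
  rw [resize_tile_map_eq_map, resize_tile_map_alt_eq]
  set W := ns.1.toNat with hW
  set H := ns.2.toNat with hH
  set L := (tm.headD []).length with hL
  set C := min W L with hC
  apply List.ext_getElem
  · simp
  · intro y hy1 hy2
    simp only [List.length_map, List.length_range] at hy1
    by_cases hylt : y < tm.length
    · -- copied (or partially filled) row from the source
      have hytm : y < ((tm.take H).map (fun row =>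
          row.take C ++ List.replicate (W - C) fv)).length := by simp; omega
      rw [List.getElem_map, List.getElem_range, List.getElem_append_left hytm]
      rw [List.getElem_map, List.getElem_take]
      have hrow : C ≤ tm[y].length := by
        have := hpre tm[y] (List.mem_take_iff_getElem.mpr ⟨y, by omega, by simp⟩)
        omega
      apply List.ext_getElem
      · simp; omega
      · intro x hx1 hx2
        simp only [List.length_map, List.length_range] at hx1
        rw [List.getElem_map, List.getElem_range]
        by_cases hxc : x < C
        · rw [List.getElem_append_left (by simp; omega), List.getElem_take]
          have hcond : (y : Int) < (tm.length : Int) ∧ (x : Int) < (L : Int) := by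
            refine ⟨by exact_mod_cast hylt, ?_⟩
            exact_mod_cast (show x < L by omega)
          rw [if_pos hcond, List.getD_eq_getElem tm [] hylt,
              List.getD_eq_getElem tm[y] 0 (by omega)]
        · have hcond : ¬((y : Int) < (tm.length : Int) ∧ (x : Int) < (L : Int)) := by
            rintro ⟨-, hxl⟩
            have : x < L := by exact_mod_cast hxl
            omega
          rw [if_neg hcond, List.getElem_append_right (by simp; omega)]
          simp
    · -- pure fill row
      have hcond : ∀ x : Nat, ¬((y : Int) < (tm.length : Int) ∧ (x : Int) < (L : Int)) := by
        rintro x ⟨hyl, -⟩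
        have : y < tm.length := by exact_mod_cast hyl
        omega
      rw [List.getElem_map, List.getElem_range,
          List.getElem_append_right (by simp; omega)]
      simp only [List.getElem_replicate]
      have hmap : (List.range W).map (fun (x : Nat) => if (y : Int) < (tm.length : Int) ∧ (x : Int) < (L : Int) then (tm.getD y []).getD x 0 else fv)
          = (List.range W).map (fun _ => fv) := by
        apply List.map_congr_left; intro x _; exact if_neg (hcond x)
      rw [hmap, range_map_const]
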